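-- pv_equiv track=rewrite | github.com/phac-nml/locidex | locidex/classes/aligner.py | gap_fill
-- ===== SOURCE A (Python) =====
-- def gap_fill(seq1, seq2):
--     seq = []
--     is_end = True
--     length = len(seq1)
--     for i in range(0, length):
--         b1 = seq1[i]
--         b2 = seq2[i]
--         if b1 == '-':
--             is_end = False
--         if is_end and b2 == '-':
--             b2 = b1
--         seq.append(b2)
--     return "".join([str(x) for x in seq])
-- ===== SOURCE B (Python) =====
-- def gap_fill(seq1, seq2):
--     cut = next((i for i, c in enumerate(seq1) if c == '-'), len(seq1))
--     head = "".join(seq1[i] if seq2[i] == '-' else seq2[i] for i in range(cut))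
--     return head + seq2[cut:len(seq1)]
-- ===== Notes on version B (the rewrite author's own statement) =====
-- stated objective: simpler
-- what changed: Replaced the single stateful loop threading an is_end flag through every index by computing the first-'-' cutoff of seq1 once and then emitting two region passes: a gap-filling merge before the cutoff and a verbatim slice of seq2 after it.
import Mathlib
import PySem

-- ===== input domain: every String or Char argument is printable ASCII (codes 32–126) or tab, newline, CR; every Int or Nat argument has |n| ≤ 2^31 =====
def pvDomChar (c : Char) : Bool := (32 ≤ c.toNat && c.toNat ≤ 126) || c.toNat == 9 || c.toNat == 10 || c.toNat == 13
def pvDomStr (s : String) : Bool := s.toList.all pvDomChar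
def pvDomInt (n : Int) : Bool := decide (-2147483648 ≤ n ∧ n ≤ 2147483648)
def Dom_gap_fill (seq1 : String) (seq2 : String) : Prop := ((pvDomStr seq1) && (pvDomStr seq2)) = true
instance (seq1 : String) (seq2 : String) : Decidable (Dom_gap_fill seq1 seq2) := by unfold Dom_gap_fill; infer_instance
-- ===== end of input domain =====

-- B replaces A's single stateful loop (an is_end flag threaded through every index) by computing the
-- first-'-' cutoff of seq1 once and then emitting two region-shaped passes (merge before the cutoff,
-- verbatim copy after); objective: simpler. Equivalence is about return values on Pre_ (A raises
-- IndexError when seq2 is shorter than seq1; those inputs are excluded).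

-- ===== PORT A =====
-- literal transliteration of A: Option state mirrors the possible IndexError on seq2[i]
def gap_fill (seq1 : String) (seq2 : String) : String :=
  let l1 := seq1.toList
  let l2 := seq2.toList
  let length : Int := l1.length
  let res := (PySem.List.pyRange 0 length 1).foldl
    (fun (st : Option (List Char × Bool)) i =>
      match st with
      | none => none
      | some (seq, is_end) =>
        match PySem.List.pyGet? l1 i, PySem.List.pyGet? l2 i with
        | some b1, some b2 =>
          let is_end := if b1 = '-' then false else is_end
          let b2 := if is_end = true ∧ b2 = '-' then b1 else b2
          some (seq ++ [b2], is_end)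
        | _, _ => none)
    (some (([] : List Char), true))
  match res with
  | some (seq, _) => String.ofList seq
  | none => ""          -- unreachable under Pre_ (Python raises IndexError here)

-- ===== PORT B =====
-- transliteration of Source B: cutoff scan, a merge pass over range(cut), and the verbatim slice
def gap_fill_alt (seq1 : String) (seq2 : String) : String :=
  let l1 := seq1.toList
  let l2 := seq2.toList
  let cut := l1.findIdx (· = '-')
  let head := (List.range cut).map
    (fun i => if l2.getD i ' ' = '-' then l1.getD i ' ' else l2.getD i ' ')
  String.ofList (head ++ (l2.take l1.length).drop cut)

-- ===== PRECONDITION & SPEC =====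
-- Pre_ excludes exactly the inputs where A raises IndexError: seq2 shorter than seq1.
def Pre_gap_fill (seq1 : String) (seq2 : String) : Prop :=
  seq1.toList.length ≤ seq2.toList.length
instance (seq1 : String) (seq2 : String) : Decidable (Pre_gap_fill seq1 seq2) := by
  unfold Pre_gap_fill; infer_instance

def pvWitness_gap_fill : String × String := ("a-cd", "-x-y")

def Spec_gap_fill (seq1 : String) (seq2 : String) (out : String) : Prop := out = gap_fill_alt seq1 seq2
instance (seq1 : String) (seq2 : String) (out : String) : Decidable (Spec_gap_fill seq1 seq2 out) := by unfold Spec_gap_fill; infer_instance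

-- ===== CLAIM (what is proved, stated in full; the proofs are below) =====
def Claim_equal_gap_fill : Prop := ∀ (seq1 : String) (seq2 : String), Dom_gap_fill seq1 seq2 → Pre_gap_fill seq1 seq2 → Spec_gap_fill seq1 seq2 (gap_fill seq1 seq2)

-- ===== LEMMAS AND PROOFS =====

-- the common value both programs compute at index i (relative to the cutoff of l1)
def pvCell (l1 l2 : List Char) (i : Nat) : Char :=
  if i < l1.findIdx (· = '-') ∧ l2.getD i ' ' = '-' then l1.getD i ' ' else l2.getD i ' '

-- invariant of A's loop: after k steps the accumulator is the first k cells and the flag says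
-- "no '-' seen yet", i.e. k ≤ cut
theorem gapA_inv (l1 l2 : List Char) (k : Nat)
    (hk : k ≤ l1.length) (hp : l1.length ≤ l2.length) :
    (PySem.List.pyRange 0 (k : Int) 1).foldl
      (fun (st : Option (List Char × Bool)) i =>
        match st with
        | none => none
        | some (seq, is_end) =>
          match PySem.List.pyGet? l1 i, PySem.List.pyGet? l2 i with
          | some b1, some b2 =>
            let is_end := if b1 = '-' then false else is_end
            let b2 := if is_end = true ∧ b2 = '-' then b1 else b2
            some (seq ++ [b2], is_end)
          | _, _ => none)
      (some (([] : List Char), true))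
    = some ((List.range k).map (pvCell l1 l2), decide (k ≤ l1.findIdx (· = '-'))) := by
  induction k with
  | zero => simp [PySem.List.pyRange]
  | succ k ih =>
    have hk' : k ≤ l1.length := by omega
    have hklt : k < l1.length := by omega
    have hk2 : k < l2.length := by omega
    rw [show ((k + 1 : Nat) : Int) = (k : Int) + 1 by push_cast; ring,
        PySem.List.pyRange_one_succ_right (by exact_mod_cast Nat.zero_le k),
        List.foldl_append, ih hk']
    simp only [List.foldl_cons, List.foldl_nil]
    rw [PySem.List.pyGet?_natCast, PySem.List.pyGet?_natCast,
        List.getElem?_eq_getElem hklt, List.getElem?_eq_getElem hk2]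
    simp only [List.range_succ, List.map_append, List.map_cons, List.map_nil]
    have hflag : (if l1[k] = '-' then false else decide (k ≤ l1.findIdx (· = '-')))
        = decide (k + 1 ≤ l1.findIdx (· = '-')) := by
      by_cases hb : l1[k] = '-'
      · have hle : l1.findIdx (· = '-') ≤ k := by
          by_contra hc
          have h0 := List.not_of_lt_findIdx (p := fun x => decide (x = '-')) (xs := l1)
            (by omega : k < l1.findIdx fun x => decide (x = '-'))
          simp only [decide_eq_false_iff_not] at h0
          exact h0 hb
        have h1 : ¬ (k + 1 ≤ l1.findIdx (· = '-')) := by omega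
        simp [hb, h1]
      · simp only [hb, if_false]
        by_cases hle : k ≤ l1.findIdx (· = '-')
        · have hne : k ≠ l1.findIdx (· = '-') := by
            intro he
            subst he
            have h0 := List.findIdx_getElem (p := fun x => decide (x = '-')) (xs := l1) (w := hklt)
            simp at h0; exact hb h0
          have : k + 1 ≤ l1.findIdx (· = '-') := by omega
          simp [hle, this]
        · have : ¬ (k + 1 ≤ l1.findIdx (· = '-')) := by omega
          simp [hle, this]
    rw [hflag]
    congr 1
    have hcell : (if decide (k + 1 ≤ l1.findIdx (· = '-')) = true ∧ l2[k] = '-' then l1[k] else l2[k])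
        = pvCell l1 l2 k := by
      unfold pvCell
      rw [List.getD_eq_getElem l1 ' ' hklt, List.getD_eq_getElem l2 ' ' hk2]
      by_cases h : k + 1 ≤ l1.findIdx (· = '-') <;>
        by_cases h2 : l2[k] = '-' <;>
        simp_all
    rw [hcell]

-- B's two regions concatenate to the same cell list
theorem gapB_cells (l1 l2 : List Char) (hp : l1.length ≤ l2.length) :
    (List.range (l1.findIdx (· = '-'))).map
      (fun i => if l2.getD i ' ' = '-' then l1.getD i ' ' else l2.getD i ' ')
      ++ (l2.take l1.length).drop (l1.findIdx (· = '-'))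
    = (List.range l1.length).map (pvCell l1 l2) := by
  have hcut : l1.findIdx (· = '-') ≤ l1.length := List.findIdx_le_length
  apply List.ext_getElem
  · simp [Nat.min_eq_left hp]; omega
  · intro i hi hi2
    simp only [List.length_append, List.length_map, List.length_range, List.length_drop,
      List.length_take] at hi
    have hin : i < l1.length := by omega
    have hin2 : i < l2.length := by omega
    rw [List.getElem_map (h := by simpa using hi2)]
    simp only [List.getElem_range]
    by_cases h : i < l1.findIdx (· = '-')
    · rw [List.getElem_append_left (by simpa using h)]
      rw [List.getElem_map (h := by simpa using h)]
      simp only [List.getElem_range]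
      unfold pvCell
      simp [h]
    · rw [List.getElem_append_right (by simp; omega)]
      simp only [List.length_map, List.length_range]
      rw [List.getElem_drop, List.getElem_take]
      unfold pvCell
      have : ¬ (i < l1.findIdx (· = '-') ∧ l2.getD i ' ' = '-') := by
        intro ⟨h1, _⟩; exact h h1
      rw [if_neg this, List.getD_eq_getElem l2 ' ' hin2]
      congr 1; omega

-- ===== VERDICT (by name: the statement is the Claim_ definition above) =====
theorem gap_fill_spec : Claim_equal_gap_fill := by
  intro seq1 seq2 _hdom hpre
  unfold Spec_gap_fill gap_fill gap_fill_alt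
  have hpre' : seq1.toList.length ≤ seq2.toList.length := hpre
  simp only
  rw [gapA_inv seq1.toList seq2.toList seq1.toList.length le_rfl hpre']
  rw [gapB_cells seq1.toList seq2.toList hpre']
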